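-- pv_equiv track=rewrite | github.com/edissonchamorroc/Retos-Misi-nTic | Ciclo1/reto_4.py | eliminarCaracteresEspeciales
-- ===== SOURCE A (Python) =====
-- def eliminarCaracteresEspeciales(lista_texto):
--     lista_texto_modificada=[]
--     caracteres=['-','¿','?','.',',','¡','!',':','"','–']
--     for palabra in lista_texto:
--         for caracter in caracteres:
--             palabra=palabra.lower().replace(caracter,"")
--         lista_texto_modificada.append(palabra)
--     return lista_texto_modificada
-- ===== SOURCE B (Python) =====
-- def eliminarCaracteresEspeciales(lista_texto):
--     caracteres = {'-', '\u00bf', '?', '.', ',', '\u00a1', '!', ':', '"', '\u2013'}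
--     return ["".join(c for c in palabra.lower() if c not in caracteres)
--             for palabra in lista_texto]
-- ===== Notes on version B (the rewrite author's own statement) =====
-- stated objective: simpler
-- what changed: Replaces A's ten replace-passes (each rescanning and re-lowercasing the whole word) with a single lowercase followed by one character-filtering pass per word using a membership set.
import Mathlib
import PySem

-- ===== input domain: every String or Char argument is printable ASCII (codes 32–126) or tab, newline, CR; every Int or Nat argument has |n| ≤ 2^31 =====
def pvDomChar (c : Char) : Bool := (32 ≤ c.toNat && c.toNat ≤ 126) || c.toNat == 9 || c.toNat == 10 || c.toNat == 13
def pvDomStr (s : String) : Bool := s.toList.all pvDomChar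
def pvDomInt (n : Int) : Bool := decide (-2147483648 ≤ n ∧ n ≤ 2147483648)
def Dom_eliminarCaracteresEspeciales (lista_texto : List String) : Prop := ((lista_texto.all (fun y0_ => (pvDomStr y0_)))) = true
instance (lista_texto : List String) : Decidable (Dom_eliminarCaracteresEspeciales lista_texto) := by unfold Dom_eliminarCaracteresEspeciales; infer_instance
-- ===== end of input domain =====

-- B lowercases once and removes the special characters in a single filtering pass
-- per word, instead of A's ten replace-passes; objective: simpler.

-- ===== PORT A =====
def eliminarCaracteresEspeciales (lista_texto : List String) : List String :=
  let caracteres : List String := ["-", "¿", "?", ".", ",", "¡", "!", ":", "\"", "–"]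
  lista_texto.foldl (fun acc palabra =>
    acc ++ [caracteres.foldl
      (fun p caracter => PySem.Str.replace (PySem.Str.lower p) caracter "") palabra]) []

-- ===== PORT B =====
def pvCaracteresB : List Char := ['-', '¿', '?', '.', ',', '¡', '!', ':', '"', '–']

def eliminarCaracteresEspeciales_alt (lista_texto : List String) : List String :=
  lista_texto.map (fun palabra =>
    String.ofList (((PySem.Str.lower palabra).toList).filter (fun c => !(pvCaracteresB.contains c))))

-- ===== PRECONDITION & SPEC =====
def Spec_eliminarCaracteresEspeciales (lista_texto : List String) (out : List String) : Prop := out = eliminarCaracteresEspeciales_alt lista_texto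
instance (lista_texto : List String) (out : List String) : Decidable (Spec_eliminarCaracteresEspeciales lista_texto out) := by unfold Spec_eliminarCaracteresEspeciales; infer_instance

-- ===== CLAIM (what is proved, stated in full; the proofs are below) =====
def Claim_equal_eliminarCaracteresEspeciales : Prop := ∀ (lista_texto : List String), Dom_eliminarCaracteresEspeciales lista_texto → Spec_eliminarCaracteresEspeciales lista_texto (eliminarCaracteresEspeciales lista_texto)

-- ===== LEMMAS AND PROOFS =====

theorem lowerChar_idem (c : Char) :
    PySem.Chars.lowerChar (PySem.Chars.lowerChar c) = PySem.Chars.lowerChar c := by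
  unfold PySem.Chars.lowerChar PySem.Chars.isupper
  split_ifs with h1 h2 <;> try rfl
  exfalso
  simp only [Bool.and_eq_true, decide_eq_true_eq, Char.le_def, UInt32.le_iff_toNat_le] at h1 h2
  have h2' : (65 : Nat) ≤ (Char.ofNat (c.toNat + 32)).toNat ∧ (Char.ofNat (c.toNat + 32)).toNat ≤ 90 := h2
  have h1' : (65 : Nat) ≤ c.toNat ∧ c.toNat ≤ 90 := h1
  rw [Char.toNat_ofNat] at h2'
  have hv : (c.toNat + 32).isValidChar := Or.inl (by omega)
  simp [hv] at h2'
  omega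

-- Python's s.replace(c, "") for a single character c is exactly a filtering pass.
theorem go_single (c : Char) : ∀ (l acc : List Char) (fuel : Nat), l.length ≤ fuel →
    PySem.Chars.replace.go [c] [] fuel l acc = acc.reverse ++ l.filter (· ≠ c) := by
  intro l
  induction l with
  | nil => intro acc fuel h; cases fuel <;> simp [PySem.Chars.replace.go]
  | cons x t ih =>
    intro acc fuel h
    cases fuel with
    | zero => simp at h
    | succ f =>
      by_cases hx : x = c
      · subst hx
        simp only [PySem.Chars.replace.go]
        rw [if_pos (by simp [List.isPrefixOf])]
        simp [ih acc f (by simpa using h)]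
      · simp only [PySem.Chars.replace.go]
        rw [if_neg (by simp [List.isPrefixOf]; exact fun h' => hx h'.symm)]
        rw [ih (x :: acc) f (by simpa using h)]
        simp [hx]

theorem replace_single (l : List Char) (c : Char) :
    PySem.Chars.replace l [c] [] = l.filter (· ≠ c) := by
  simp [PySem.Chars.replace, go_single c l [] l.length le_rfl]

theorem lower_of_lowered (l : List Char) (hl : ∀ x ∈ l, PySem.Chars.lowerChar x = x) :
    PySem.Chars.lower l = l := by
  simp only [PySem.Chars.lower]
  calc l.map PySem.Chars.lowerChar = l.map id := List.map_congr_left hl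
    _ = l := List.map_id l

theorem mem_lower_lowered (m : List Char) (x : Char) (hx : x ∈ PySem.Chars.lower m) :
    PySem.Chars.lowerChar x = x := by
  simp only [PySem.Chars.lower, List.mem_map] at hx
  obtain ⟨y, _, rfl⟩ := hx
  exact lowerChar_idem y

-- One replace step of A, on the character-list level.
theorem step_toList (p : String) (car : String) (c : Char) (hc : car.toList = [c]) :
    (PySem.Str.replace (PySem.Str.lower p) car "").toList
      = (PySem.Chars.lower p.toList).filter (· ≠ c) := by
  rw [PySem.Str.toList_replace, PySem.Str.toList_lower, hc]
  have he : ("" : String).toList = [] := rfl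
  rw [he, replace_single]

-- A's remaining replace passes over an already-lowercased word are one filter.
theorem strfold (cs : List Char) : ∀ (w : String), (∀ x ∈ w.toList, PySem.Chars.lowerChar x = x) →
    ((cs.map (fun c => String.ofList [c])).foldl
        (fun p caracter => PySem.Str.replace (PySem.Str.lower p) caracter "") w).toList
      = w.toList.filter (fun x => !(cs.contains x)) := by
  induction cs with
  | nil => intro w _; simp
  | cons c cs ih =>
    intro w hw
    simp only [List.map_cons, List.foldl_cons]
    have hmk : (String.ofList [c]).toList = [c] := String.toList_ofList
    have hstep := step_toList w (String.ofList [c]) c hmk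
    rw [lower_of_lowered w.toList hw] at hstep
    rw [ih _ (by
      intro x hx
      rw [hstep] at hx
      exact hw x (List.mem_of_mem_filter hx))]
    rw [hstep, List.filter_filter]
    apply List.filter_congr
    intro x _
    by_cases hxc : x = c <;> simp [hxc]

-- A's full per-word processing equals B's per-word processing.
theorem word_eq (w : String) :
    ((["-", "¿", "?", ".", ",", "¡", "!", ":", "\"", "–"] : List String).foldl
        (fun p caracter => PySem.Str.replace (PySem.Str.lower p) caracter "") w).toList
      = (PySem.Chars.lower w.toList).filter (fun c => !(pvCaracteresB.contains c)) := by
  have hlit : (["-", "¿", "?", ".", ",", "¡", "!", ":", "\"", "–"] : List String)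
      = (String.ofList ['-']) :: (['¿', '?', '.', ',', '¡', '!', ':', '"', '–'].map (fun c => String.ofList [c])) := by
    decide
  rw [hlit]
  simp only [List.foldl_cons]
  have hmk : (String.ofList ['-']).toList = ['-'] := String.toList_ofList
  have hstep := step_toList w (String.ofList ['-']) '-' hmk
  rw [strfold _ _ (by
    intro x hx
    rw [hstep] at hx
    exact mem_lower_lowered w.toList x (List.mem_of_mem_filter hx))]
  rw [hstep, List.filter_filter]
  apply List.filter_congr
  intro x _
  by_cases hxc : x = '-' <;> simp [hxc, pvCaracteresB]

-- ===== VERDICT (by name: the statement is the Claim_ definition above) =====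
theorem eliminarCaracteresEspeciales_spec : Claim_equal_eliminarCaracteresEspeciales := by
  intro lista_texto _
  unfold Spec_eliminarCaracteresEspeciales eliminarCaracteresEspeciales eliminarCaracteresEspeciales_alt
  rw [PySem.List.foldl_append_singleton_eq_map]
  apply List.map_congr_left
  intro w _
  apply String.toList_inj.mp
  rw [word_eq w, String.toList_ofList, PySem.Str.toList_lower]
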